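-- pv_equiv track=rewrite | github.com/manwar/perlweeklychallenge-club | challenge-357/packy-anderson/python/ch-2.py | fractions
-- ===== SOURCE A (Python) =====
-- def fractions(num):
--   if num == 1: return [ (1, 1), ]
--   lst = [ (1, num), (num, 1) ]
--   digits = [2] if num == 2 else range(2, num)
--   for digit in digits:
--     if num % digit == 0: continue
--     lst.extend([(digit, num), (num, digit)])
--   lst.extend(fractions(num-1))
--   return lst
-- ===== SOURCE B (Python) =====
-- def fractions(num):
--   if num < 1:
--     raise ValueError("num must be a positive integer")
--   out = []
--   for n in range(num, 1, -1):
--     out.append((1, n))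
--     out.append((n, 1))
--     for d in range(2, n):
--       if n % d != 0:
--         out.append((d, n))
--         out.append((n, d))
--   out.append((1, 1))
--   return out
-- ===== Notes on version B (the rewrite author's own statement) =====
-- stated objective: simpler
-- what changed: Replaced the top-down recursion (one recursive call per level plus a special-cased digits list for num==2) by a single iterative downward loop over range(num,1,-1) that appends each level's pairs and finally the (1,1) base case; B validates num>=1 up front (A recurses to RecursionError there, outside Pre_).
import Mathlib
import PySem

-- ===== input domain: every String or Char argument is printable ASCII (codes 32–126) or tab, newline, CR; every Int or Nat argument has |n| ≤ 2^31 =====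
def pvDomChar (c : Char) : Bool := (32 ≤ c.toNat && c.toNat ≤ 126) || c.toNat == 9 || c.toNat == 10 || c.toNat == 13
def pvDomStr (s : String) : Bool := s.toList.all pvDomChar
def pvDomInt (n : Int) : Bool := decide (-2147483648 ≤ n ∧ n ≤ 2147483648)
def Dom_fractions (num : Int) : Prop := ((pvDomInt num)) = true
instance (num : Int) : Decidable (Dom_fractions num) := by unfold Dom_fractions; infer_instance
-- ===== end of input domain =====

-- B replaces the top-down recursion by a single iterative downward loop (simpler, no recursion).
-- For num ≤ 0, Python A recurses until RecursionError and Python B raises ValueError; both outside Pre_.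

-- ===== PORT A =====
def fractions (num : Int) : List (Int × Int) :=
  if num = 1 then [(1, 1)]
  else if _h : num ≤ 0 then []  -- totality guard only: Python recurses forever here (outside Pre_)
  else
    let digits := if num = 2 then [(2 : Int)] else PySem.List.pyRange 2 num 1
    let lst := digits.foldl
      (fun lst d => if PySem.Int.mod num d == 0 then lst else lst ++ [(d, num), (num, d)])
      [(1, num), (num, 1)]
    lst ++ fractions (num - 1)
termination_by num.toNat
decreasing_by omega

-- ===== PORT B =====
def fractions_alt (num : Int) : List (Int × Int) :=
  if num < 1 then []  -- Python B raises ValueError here (outside Pre_)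
  else
    ((PySem.List.pyRange num 1 (-1)).foldl
        (fun out n =>
          (PySem.List.pyRange 2 n 1).foldl
            (fun out d => if PySem.Int.mod n d != 0 then out ++ [(d, n), (n, d)] else out)
            (out ++ [(1, n), (n, 1)]))
        [])
    ++ [(1, 1)]

-- ===== PRECONDITION & SPEC =====
-- Pre_ excludes num ≤ 0: there Python A never returns (infinite recursion → RecursionError).
def Pre_fractions (num : Int) : Prop := 1 ≤ num
instance (num : Int) : Decidable (Pre_fractions num) := by unfold Pre_fractions; infer_instance
def pvWitness_fractions : Int := 4

def Spec_fractions (num : Int) (out : List (Int × Int)) : Prop := out = fractions_alt num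
instance (num : Int) (out : List (Int × Int)) : Decidable (Spec_fractions num out) := by unfold Spec_fractions; infer_instance

-- ===== CLAIM (what is proved, stated in full; the proofs are below) =====
def Claim_equal_fractions : Prop := ∀ (num : Int), Dom_fractions num → Pre_fractions num → Spec_fractions num (fractions num)

-- ===== LEMMAS AND PROOFS =====

/-- The pairs contributed by one level `n`. -/
def pvLevel (n : Int) : List (Int × Int) :=
  [(1, n), (n, 1)] ++
    ((PySem.List.pyRange 2 n 1).filter (fun d => !(PySem.Int.mod n d == 0))).flatMap
      (fun d => [(d, n), (n, d)])

theorem pvFoldlSkip (c : Int → Bool) (g : Int → List (Int × Int)) (l : List Int)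
    (init : List (Int × Int)) :
    l.foldl (fun acc x => if c x then acc else acc ++ g x) init
      = init ++ (l.filter (fun x => !c x)).flatMap g := by
  induction l generalizing init with
  | nil => simp
  | cons x xs ih =>
      by_cases h : c x = true <;> simp [List.foldl_cons, ih, h, List.filter_cons]

theorem pvFoldlTake (c : Int → Bool) (g : Int → List (Int × Int)) (l : List Int)
    (init : List (Int × Int)) :
    l.foldl (fun acc x => if c x then acc ++ g x else acc) init
      = init ++ (l.filter c).flatMap g := by
  induction l generalizing init with
  | nil => simp
  | cons x xs ih =>
      by_cases h : c x = true <;> simp [List.foldl_cons, ih, h, List.filter_cons]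

theorem pvAlt_eq (num : Int) (h : 1 ≤ num) :
    fractions_alt num = (PySem.List.pyRange num 1 (-1)).flatMap pvLevel ++ [(1, 1)] := by
  unfold fractions_alt
  rw [if_neg (by omega)]
  congr 1
  have hstep : ∀ (out : List (Int × Int)) (n : Int),
      (PySem.List.pyRange 2 n 1).foldl
          (fun out d => if PySem.Int.mod n d != 0 then out ++ [(d, n), (n, d)] else out)
          (out ++ [(1, n), (n, 1)]) = out ++ pvLevel n := by
    intro out n
    rw [pvFoldlTake (fun d => PySem.Int.mod n d != 0) (fun d => [(d, n), (n, d)])]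
    simp [pvLevel, bne]
  calc (PySem.List.pyRange num 1 (-1)).foldl
          (fun out n =>
            (PySem.List.pyRange 2 n 1).foldl
              (fun out d => if PySem.Int.mod n d != 0 then out ++ [(d, n), (n, d)] else out)
              (out ++ [(1, n), (n, 1)])) []
      = (PySem.List.pyRange num 1 (-1)).foldl (fun out n => out ++ pvLevel n) [] := by
          have hf : (fun (out : List (Int × Int)) (n : Int) =>
              (PySem.List.pyRange 2 n 1).foldl
                (fun out d => if PySem.Int.mod n d != 0 then out ++ [(d, n), (n, d)] else out)
                (out ++ [(1, n), (n, 1)])) = (fun out n => out ++ pvLevel n) := by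
            funext out n; exact hstep out n
          rw [hf]
    _ = (PySem.List.pyRange num 1 (-1)).flatMap pvLevel := by
          simpa using PySem.List.foldl_append_eq_flatMap pvLevel (PySem.List.pyRange num 1 (-1)) []

theorem pvA_level (num : Int) (h2 : 2 ≤ num) :
    (if num = 2 then [(2 : Int)] else PySem.List.pyRange 2 num 1).foldl
        (fun lst d => if PySem.Int.mod num d == 0 then lst else lst ++ [(d, num), (num, d)])
        [(1, num), (num, 1)] = pvLevel num := by
  by_cases h : num = 2
  · subst h; decide
  · rw [if_neg h,
      pvFoldlSkip (fun d => PySem.Int.mod num d == 0) (fun d => [(d, num), (num, d)])]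
    rfl

theorem pvA_eq (n : Nat) :
    fractions ((n : Int) + 1) = (PySem.List.pyRange ((n : Int) + 1) 1 (-1)).flatMap pvLevel ++ [(1, 1)] := by
  induction n with
  | zero =>
      rw [fractions]
      simp [PySem.List.pyRange_neg_one_eq_nil (by norm_num : (1 : Int) ≤ 1)]
  | succ k ih =>
      have h2 : (2 : Int) ≤ (k : Int) + 1 + 1 := by omega
      push_cast
      rw [fractions]
      rw [if_neg (by omega : ¬ ((k : Int) + 1 + 1 = 1)), dif_neg (by omega : ¬ ((k : Int) + 1 + 1 ≤ 0))]
      have hc : PySem.List.pyRange ((k : Int) + 1 + 1) 1 (-1)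
          = ((k : Int) + 1 + 1) :: PySem.List.pyRange ((k : Int) + 1) 1 (-1) := by
        have := PySem.List.pyRange_neg_one_cons (a := (k : Int) + 1 + 1) (b := 1) (by omega)
        simpa using this
      rw [hc]
      simp only [List.flatMap_cons]
      rw [pvA_level _ h2]
      have : (k : Int) + 1 + 1 - 1 = (k : Int) + 1 := by ring
      rw [this, ih, List.append_assoc]

-- ===== VERDICT (by name: the statement is the Claim_ definition above) =====
theorem fractions_spec : Claim_equal_fractions := by
  intro num _ hpre
  unfold Spec_fractions
  have h1 : (1 : Int) ≤ num := hpre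
  have hn : num = ((num - 1).toNat : Int) + 1 := by omega
  rw [pvAlt_eq num h1, hn, pvA_eq]
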